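-- pv_equiv track=rewrite | github.com/pypi-data/pypi-mirror-61 | packages/kwik24-ai-combination-sku/kwik24_ai_combination_sku-0.0.2-py3-none-any.whl/inference/code/inference_utils/inference_support_fns.py | get_model_no
-- ===== SOURCE A (Python) =====
-- def get_model_no(txn_video_product_id, pd_config):
--
--     model_no = -1
--     for model_id in pd_config.keys():
--         product_ids = pd_config[model_id]['product_ids']
--         for product_id in product_ids:
--             product_id_str = str(product_id)
--             if (product_id_str in txn_video_product_id):
--                 model_no = model_id
--
--     return model_no
-- ===== SOURCE B (Python) =====
-- def get_model_no(txn_video_product_id, pd_config):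
--     # Stage 1: stringify every model's product ids.
--     id_strs = [[str(p) for p in cfg['product_ids']] for cfg in pd_config.values()]
--     # Stage 2: index every substring of the transaction id up to the longest id length.
--     L = max((len(s) for ids in id_strs for s in ids), default=0)
--     n = len(txn_video_product_id)
--     subs = {txn_video_product_id[i:i + k] for i in range(n) for k in range(1, min(L, n - i) + 1)}
--     # Stage 3: a model matches iff its id strings intersect the substring index; keep the last.
--     matches = [m for m, ids in zip(pd_config.keys(), id_strs) if not subs.isdisjoint(ids)]
--     return matches[-1] if matches else -1
-- ===== Notes on version B (the rewrite author's own statement) =====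
-- stated objective: alternative
-- what changed: B precomputes a set index of all substrings of the transaction id (up to the longest product-id length) and tests each model by set intersection, then returns the last element of the staged match list, instead of A's nested scans running a substring search per product id with an overwritten running variable.
import Mathlib
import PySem

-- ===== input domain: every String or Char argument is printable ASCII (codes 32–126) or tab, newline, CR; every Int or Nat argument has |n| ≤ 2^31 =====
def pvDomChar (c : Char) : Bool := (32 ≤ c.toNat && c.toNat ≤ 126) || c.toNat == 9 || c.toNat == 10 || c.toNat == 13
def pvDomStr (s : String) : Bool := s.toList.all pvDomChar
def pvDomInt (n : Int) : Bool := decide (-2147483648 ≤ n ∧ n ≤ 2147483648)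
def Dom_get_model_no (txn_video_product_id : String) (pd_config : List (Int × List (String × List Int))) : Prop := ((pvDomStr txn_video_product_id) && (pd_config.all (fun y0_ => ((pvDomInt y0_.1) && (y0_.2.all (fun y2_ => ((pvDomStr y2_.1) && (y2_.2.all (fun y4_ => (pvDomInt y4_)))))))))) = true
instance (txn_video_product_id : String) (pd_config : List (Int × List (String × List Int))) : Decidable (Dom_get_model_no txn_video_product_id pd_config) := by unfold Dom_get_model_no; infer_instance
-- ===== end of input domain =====

-- B replaces A's nested substring scans by a precomputed index: it builds the set of all
-- substrings of the transaction id up to the longest product-id length, tests each model by a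
-- set intersection, and returns the last member of the match list; objective: alternative.

-- ===== PORT A =====
def get_model_no (txn_video_product_id : String) (pd_config : List (Int × List (String × List Int))) : Int :=
  pd_config.foldl
    (fun model_no p =>
      let product_ids := ((PySem.Dict.ofList p.2).get? "product_ids").getD []
      product_ids.foldl
        (fun acc product_id =>
          let product_id_str := PySem.Int.toStr product_id
          if PySem.Str.isIn product_id_str txn_video_product_id then p.1 else acc)
        model_no)
    (-1)

-- ===== PORT B =====
def get_model_no_alt (txn_video_product_id : String) (pd_config : List (Int × List (String × List Int))) : Int :=
  let id_strs := pd_config.map (fun cfg => (((PySem.Dict.ofList cfg.2).get? "product_ids").getD []).map PySem.Int.toStr)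
  let L := PySem.List.maxD (id_strs.flatten.map PySem.Str.len) (fun x => x) 0
  let n := PySem.Str.len txn_video_product_id
  let subs : PySem.Set String := PySem.Set.ofList
    ((PySem.List.pyRange 0 n).flatMap (fun i =>
      (PySem.List.pyRange 1 (min L (n - i) + 1)).map (fun k =>
        PySem.Str.slice txn_video_product_id (some i) (some (i + k)))))
  let matched := (((pd_config.map Prod.fst).zip id_strs).filter
      (fun mi => !(PySem.Set.isdisjoint subs mi.2))).map Prod.fst
  (matched.getLast?).getD (-1)

-- ===== PRECONDITION & SPEC =====
-- Pre_ excludes exactly the inputs where A (and B alike) raises KeyError: some model's inner dict has no 'product_ids' key.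
def Pre_get_model_no (txn_video_product_id : String) (pd_config : List (Int × List (String × List Int))) : Prop :=
  ∀ p ∈ pd_config, "product_ids" ∈ p.2.map Prod.fst
instance (txn_video_product_id : String) (pd_config : List (Int × List (String × List Int))) : Decidable (Pre_get_model_no txn_video_product_id pd_config) := by unfold Pre_get_model_no; infer_instance

def pvWitness_get_model_no : String × (List (Int × List (String × List Int))) :=
  ("a12b", [(3, [("product_ids", [12, 7])]), (5, [("product_ids", [9])])])

def Spec_get_model_no (txn_video_product_id : String) (pd_config : List (Int × List (String × List Int))) (out : Int) : Prop := out = get_model_no_alt txn_video_product_id pd_config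
instance (txn_video_product_id : String) (pd_config : List (Int × List (String × List Int))) (out : Int) : Decidable (Spec_get_model_no txn_video_product_id pd_config out) := by unfold Spec_get_model_no; infer_instance

-- ===== CLAIM (what is proved, stated in full; the proofs are below) =====
def Claim_equal_get_model_no : Prop := ∀ (txn_video_product_id : String) (pd_config : List (Int × List (String × List Int))), Dom_get_model_no txn_video_product_id pd_config → Pre_get_model_no txn_video_product_id pd_config → Spec_get_model_no txn_video_product_id pd_config (get_model_no txn_video_product_id pd_config)

-- ===== LEMMAS AND PROOFS =====
-- the product ids of one config entry
def pvPids (p : Int × List (String × List Int)) : List Int :=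
  ((PySem.Dict.ofList p.2).get? "product_ids").getD []

-- the longest id-string length B indexes up to
def pvL (pd : List (Int × List (String × List Int))) : Int :=
  PySem.List.maxD ((pd.map (fun cfg => (pvPids cfg).map PySem.Int.toStr)).flatten.map PySem.Str.len) (fun x => x) 0

-- the list of candidate substrings B's set is built from
def pvSubsList (txn : String) (L : Int) : List String :=
  (PySem.List.pyRange 0 (PySem.Str.len txn)).flatMap (fun i =>
    (PySem.List.pyRange 1 (min L (PySem.Str.len txn - i) + 1)).map (fun k =>
      PySem.Str.slice txn (some i) (some (i + k))))

lemma toDigitsCore_length_ge (b fuel n : Nat) (acc : List Char) :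
    acc.length ≤ (Nat.toDigitsCore b fuel n acc).length := by
  induction fuel generalizing n acc with
  | zero => simp [Nat.toDigitsCore]
  | succ f ih =>
      simp only [Nat.toDigitsCore]
      split
      · simp
      · exact le_trans (by simp) (ih _ _)

lemma toDigits_ne_nil (n : Nat) : Nat.toDigits 10 n ≠ [] := by
  unfold Nat.toDigits
  simp only [Nat.toDigitsCore]
  split
  · simp
  · intro h
    have h1 := toDigitsCore_length_ge 10 n (n / 10) [Nat.digitChar (n % 10)]
    rw [h] at h1
    simp at h1

-- str(pid) is never empty
lemma toStr_len_pos (n : Int) : 1 ≤ (PySem.Int.toStr n).toList.length := by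
  rw [PySem.Int.toList_toStr]
  have hne : PySem.Int.toChars n ≠ [] := by
    unfold PySem.Int.toChars
    split
    · simp
    · exact toDigits_ne_nil _
  cases h : PySem.Int.toChars n with
  | nil => exact absurd h hne
  | cons a l => simp

-- every id string of the config has length at most pvL
lemma len_le_pvL (pd : List (Int × List (String × List Int)))
    (p : Int × List (String × List Int)) (hp : p ∈ pd) (pid : Int) (hpid : pid ∈ pvPids p) :
    ((PySem.Int.toStr pid).toList.length : Int) ≤ pvL pd := by
  have hmem : PySem.Int.toStr pid ∈ (pd.map (fun cfg => (pvPids cfg).map PySem.Int.toStr)).flatten := by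
    rw [List.mem_flatten]
    exact ⟨(pvPids p).map PySem.Int.toStr, List.mem_map_of_mem hp, List.mem_map_of_mem hpid⟩
  have hmem2 : PySem.Str.len (PySem.Int.toStr pid)
      ∈ (pd.map (fun cfg => (pvPids cfg).map PySem.Int.toStr)).flatten.map PySem.Str.len :=
    List.mem_map_of_mem hmem
  have h := PySem.List.le_key_maxD _ (fun x => x) 0 (List.ne_nil_of_mem hmem2) _ hmem2
  rw [PySem.Str.len_eq] at h
  exact h

lemma if_or_bool {α : Type} (b c : Bool) (v acc : α) :
    (if c = true then v else if b = true then v else acc) = (if (b || c) = true then v else acc) := by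
  cases b <;> cases c <;> simp

-- A's inner loop always writes the same value v, so it is 'if any pid matches then v else acc'
lemma inner_foldl_eq (txn : String) (v : Int) (pids : List Int) (acc : Int) :
    pids.foldl (fun a pid => if PySem.Str.isIn (PySem.Int.toStr pid) txn then v else a) acc
      = if pids.any (fun pid => PySem.Str.isIn (PySem.Int.toStr pid) txn) then v else acc := by
  induction pids generalizing acc with
  | nil => simp
  | cons x xs ih =>
      simp only [List.foldl_cons, List.any_cons, ih]
      exact if_or_bool _ _ _ _

-- a fold that overwrites its accumulator on a test computes the last element of the filtered list
lemma foldl_overwrite_eq_getLast {α β : Type} (f : α → Bool) (g : α → β) (l : List α) (init : β) :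
    l.foldl (fun acc p => if f p then g p else acc) init
      = (((l.filter f).map g).getLast?).getD init := by
  induction l generalizing init with
  | nil => simp
  | cons p l ih =>
      simp only [List.foldl_cons, List.filter_cons]
      by_cases h : f p
      · simp [h, ih (g p), List.getLast?_cons]
      · simp [h, ih init]

-- membership in B's substring list is exactly Python's 'sub in txn', for 1 ≤ len sub ≤ L
lemma mem_subsList_iff (txn s : String) (L : Int)
    (h1 : 1 ≤ s.toList.length) (hL : (s.toList.length : Int) ≤ L) :
    s ∈ pvSubsList txn L ↔ PySem.Str.isIn s txn = true := by
  unfold pvSubsList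
  simp only [List.mem_flatMap, List.mem_map, PySem.List.mem_pyRange_one, PySem.Str.len_eq]
  rw [PySem.Str.isIn_eq, ← PySem.Chars.exists_prefix_drop_iff_isIn]
  constructor
  · rintro ⟨i, ⟨hi0, hin⟩, k, ⟨hk1, hkm⟩, hs⟩
    refine ⟨i.toNat, ?_⟩
    have hi : i = ((i.toNat : Nat) : Int) := by omega
    have hik : i + k = (((i.toNat + k.toNat) : Nat) : Int) := by omega
    have hcast := congrArg String.toList hs
    rw [PySem.Str.toList_slice, hik, hi] at hcast
    unfold PySem.Chars.slice at hcast
    rw [PySem.List.slice_natCast] at hcast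
    rw [← hcast]
    exact List.take_prefix _ _
  · rintro ⟨j, hpre⟩
    have hlen : s.toList.length ≤ txn.toList.length - j := by
      have := hpre.length_le
      rw [List.length_drop] at this
      omega
    have hjlt : j < txn.toList.length := by omega
    refine ⟨(j : Int), ⟨by omega, by exact_mod_cast hjlt⟩,
            (s.toList.length : Int), ⟨by exact_mod_cast h1, by omega⟩, ?_⟩
    rw [← String.toList_inj, PySem.Str.toList_slice]
    unfold PySem.Chars.slice
    have hik : (j : Int) + (s.toList.length : Int) = (((j + s.toList.length) : Nat) : Int) := by omega
    rw [hik, PySem.List.slice_natCast]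
    have htk : j + s.toList.length - j = s.toList.length := by omega
    rw [htk]
    exact (List.prefix_iff_eq_take.mp hpre).symm

-- A's per-entry test equals B's set-intersection test, for entries of the config
lemma test_eq (txn : String) (pd : List (Int × List (String × List Int)))
    (p : Int × List (String × List Int)) (hp : p ∈ pd) :
    ((pvPids p).any (fun pid => PySem.Str.isIn (PySem.Int.toStr pid) txn))
      = !(PySem.Set.isdisjoint (PySem.Set.ofList (pvSubsList txn (pvL pd)))
            ((pvPids p).map PySem.Int.toStr)) := by
  rw [Bool.eq_iff_iff, Bool.not_eq_eq_eq_not, Bool.not_true, ← Bool.not_eq_true,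
      PySem.Set.isdisjoint_iff]
  push_neg
  simp only [List.any_eq_true]
  constructor
  · rintro ⟨pid, hpid, hin⟩
    refine ⟨PySem.Int.toStr pid, ?_, List.mem_map_of_mem hpid⟩
    rw [PySem.Set.mem_ofList,
        mem_subsList_iff txn _ (pvL pd) (toStr_len_pos pid) (len_le_pvL pd p hp pid hpid)]
    exact hin
  · rintro ⟨x, hxsub, hxids⟩
    simp only [List.mem_map] at hxids
    obtain ⟨pid, hpid, rfl⟩ := hxids
    refine ⟨pid, hpid, ?_⟩
    rw [← mem_subsList_iff txn _ (pvL pd) (toStr_len_pos pid) (len_le_pvL pd p hp pid hpid),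
        ← PySem.Set.mem_ofList]
    exact hxsub

-- ===== VERDICT (by name: the statement is the Claim_ definition above) =====
theorem get_model_no_spec : Claim_equal_get_model_no := by
  intro txn pd _ _
  unfold Spec_get_model_no get_model_no get_model_no_alt
  have hA : pd.foldl
      (fun model_no p =>
        (((PySem.Dict.ofList p.2).get? "product_ids").getD []).foldl
          (fun acc product_id =>
            if PySem.Str.isIn (PySem.Int.toStr product_id) txn then p.1 else acc)
          model_no)
      (-1)
    = pd.foldl
      (fun acc p => if (pvPids p).any (fun pid => PySem.Str.isIn (PySem.Int.toStr pid) txn) then p.1 else acc)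
      (-1) := by
    congr 1
    funext acc p
    exact inner_foldl_eq txn p.1 (pvPids p) acc
  simp only []
  rw [hA, foldl_overwrite_eq_getLast]
  simp only [List.zip_map', List.filter_map, List.map_map]
  exact congrArg
    (fun l : List (Int × List (String × List Int)) => (((l.map Prod.fst).getLast?).getD (-1) : Int))
    (List.filter_congr (fun p hp => test_eq txn pd p hp))
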